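-- pv_equiv track=rewrite | github.com/cisco/libest | test/util/est_coap_client.py | adjust_string
-- ===== SOURCE A (Python) =====
-- def adjust_string(string, adjustment=0):
--
--     # Add to the return string
--     if adjustment > 0:
--        add_string = 'ABCDEFGHIJKLMNOPQRSTUVWXYZabcdefghijklmnopqrstuvwxyz'
--        try:
--            # Loop until string is long enough
--            while len(add_string) < adjustment:
--                add_string += add_string
--            add_string = add_string[:adjustment]
--            string += add_string
--        except TypeError:
--            pass
--
--     # Truncate the return string
--     if adjustment < 0:
--         try:
--             string = string[:adjustment]
--         except TypeError:
--             pass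
--
--     # Return the updated string
--     return string
-- ===== SOURCE B (Python) =====
-- def adjust_string(string, adjustment=0):
--     # Pad by synthesizing each pad character directly from its index
--     # (i % 52 -> letter), instead of building/slicing a repeated constant.
--     if adjustment > 0:
--         try:
--             string += ''.join(
--                 chr((65 + r) if r < 26 else (71 + r))
--                 for r in (i % 52 for i in range(adjustment)))
--         except TypeError:
--             pass
--
--     # Truncate by computing the kept length explicitly
--     if adjustment < 0:
--         try:
--             string = string[:max(0, len(string) + adjustment)]
--         except TypeError:
--             pass
--
--     return string
-- ===== Notes on version B (the rewrite author's own statement) =====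
-- stated objective: alternative
-- what changed: The pad is no longer built from the 52-letter constant at all: each pad character is synthesized arithmetically from its index (chr(65+i%52) or chr(71+i%52)) in one pass over range(adjustment), and the truncation computes the kept length max(0, len+adjustment) explicitly instead of a negative-index slice.
import Mathlib
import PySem

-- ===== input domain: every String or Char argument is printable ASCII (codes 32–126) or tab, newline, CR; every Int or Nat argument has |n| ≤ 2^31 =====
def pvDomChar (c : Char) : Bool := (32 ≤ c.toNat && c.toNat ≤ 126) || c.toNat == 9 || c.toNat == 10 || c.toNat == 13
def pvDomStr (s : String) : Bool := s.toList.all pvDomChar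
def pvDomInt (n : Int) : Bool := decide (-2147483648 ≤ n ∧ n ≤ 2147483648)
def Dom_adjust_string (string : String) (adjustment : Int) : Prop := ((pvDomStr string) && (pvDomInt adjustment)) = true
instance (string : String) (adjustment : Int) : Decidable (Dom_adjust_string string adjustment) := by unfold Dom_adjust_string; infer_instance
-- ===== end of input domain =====

-- B synthesizes each pad character arithmetically from its index (no repeated constant)
-- and truncates by an explicitly computed kept length (alternative, same cost).

-- ===== PORT A =====
def pvAlphabet : List Char :=
  "ABCDEFGHIJKLMNOPQRSTUVWXYZabcdefghijklmnopqrstuvwxyz".toList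

-- 'while len(add_string) < adjustment: add_string += add_string'
-- (the 's = []' guard only makes the loop total; A's s is the nonempty alphabet)
def pvGrow (s : List Char) (n : Nat) : List Char :=
  if _hs : s = [] then s
  else if _h : s.length < n then pvGrow (s ++ s) n else s
termination_by n - s.length
decreasing_by
  have : 1 ≤ s.length := List.length_pos_iff.mpr _hs
  simp only [List.length_append]; omega

def adjust_string (string : String) (adjustment : Int) : String :=
  if adjustment > 0 then
    -- add_string grows by doubling, then add_string[:adjustment], then string += add_string
    let add := pvGrow pvAlphabet adjustment.toNat
    let add := PySem.List.slice add none (some adjustment)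
    String.ofList (string.toList ++ add)
  else if adjustment < 0 then
    String.ofList (PySem.List.slice string.toList none (some adjustment))
  else string

-- ===== PORT B =====
-- chr((65 + r) if r < 26 else (71 + r))
def pvPadChar (r : Nat) : Char :=
  if r < 26 then Char.ofNat (65 + r) else Char.ofNat (71 + r)

def adjust_string_alt (string : String) (adjustment : Int) : String :=
  if adjustment > 0 then
    -- string += ''.join(pad char for i % 52 for i in range(adjustment))
    String.ofList (string.toList ++
      (List.range adjustment.toNat).map (fun i => pvPadChar (i % 52)))
  else if adjustment < 0 then
    -- string = string[:max(0, len(string) + adjustment)]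
    String.ofList (string.toList.take ((string.toList.length : Int) + adjustment).toNat)
  else string

-- ===== PRECONDITION & SPEC =====
def Spec_adjust_string (string : String) (adjustment : Int) (out : String) : Prop := out = adjust_string_alt string adjustment
instance (string : String) (adjustment : Int) (out : String) : Decidable (Spec_adjust_string string adjustment out) := by unfold Spec_adjust_string; infer_instance

-- ===== CLAIM =====
def Claim_equal_adjust_string : Prop := ∀ (string : String) (adjustment : Int), Dom_adjust_string string adjustment → Spec_adjust_string string adjustment (adjust_string string adjustment)

-- ===== LEMMAS AND PROOFS =====

-- s * k (repetition), used only to characterise pvGrow's result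
def pvRep : Nat → List Char → List Char
  | 0, _ => []
  | k + 1, l => l ++ pvRep k l

theorem pvRep_double (k : Nat) (l : List Char) : pvRep k (l ++ l) = pvRep (2 * k) l := by
  induction k with
  | zero => simp [pvRep]
  | succ k ih =>
    simp only [pvRep, ih, List.append_assoc]
    rfl

theorem pvGrow_spec (s : List Char) (n : Nat) (hs : s ≠ []) :
    ∃ k, 1 ≤ k ∧ pvGrow s n = pvRep k s ∧ n ≤ k * s.length := by
  fun_induction pvGrow s n with
  | case1 => exact absurd rfl hs
  | case2 =>
    rename_i t hne h ih
    obtain ⟨k, hk1, heq, hle⟩ := ih (by simp [hne])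
    refine ⟨2 * k, by omega, ?_, ?_⟩
    · rw [heq, pvRep_double]
    · simp only [List.length_append] at hle
      have : k * (t.length + t.length) = 2 * k * t.length := by ring
      omega
  | case3 =>
    rename_i t hne h
    exact ⟨1, le_refl _, by simp [pvRep], by simpa [Nat.not_lt] using h⟩

theorem alphabet_eq_map : pvAlphabet = (List.range 52).map (fun i => pvPadChar (i % 52)) := by
  decide

theorem pvRep_alphabet_eq_map (k : Nat) :
    pvRep k pvAlphabet = (List.range (k * 52)).map (fun i => pvPadChar (i % 52)) := by
  induction k with
  | zero => simp [pvRep]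
  | succ k ih =>
    have hadd : (k + 1) * 52 = 52 + k * 52 := by ring
    rw [pvRep, ih, hadd, List.range_add, List.map_append, List.map_map]
    rw [← alphabet_eq_map]
    congr 1
    exact List.map_congr_left (fun i _ => by simp [Function.comp, Nat.add_mod_left])

-- ===== VERDICT =====
theorem adjust_string_spec : Claim_equal_adjust_string := by
  intro string adjustment _
  unfold Spec_adjust_string adjust_string adjust_string_alt
  by_cases hpos : adjustment > 0
  · simp only [hpos, if_pos]
    obtain ⟨k, hk1, heq, hle⟩ := pvGrow_spec pvAlphabet adjustment.toNat (by decide)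
    have hlen : pvAlphabet.length = 52 := by decide
    rw [heq, PySem.List.slice_to _ (by omega), pvRep_alphabet_eq_map,
      ← List.map_take, List.take_range]
    have hmin : min adjustment.toNat (k * 52) = adjustment.toNat := by
      rw [hlen] at hle; omega
    rw [hmin]
  · simp only [hpos, if_false]
    by_cases hneg : adjustment < 0
    · simp only [hneg, if_pos]
      obtain ⟨m, hm, hm0⟩ : ∃ m : Nat, adjustment = -(m : Int) ∧ 0 < m :=
        ⟨(-adjustment).toNat, by omega, by omega⟩
      subst hm
      rw [PySem.List.slice_to_neg_natCast _ _ hm0,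
        show (((string.toList.length : Nat) : Int) + -((m : Nat) : Int)).toNat
            = string.toList.length - m from by omega]
    · simp [hneg]
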